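-- pv_equiv track=rewrite | github.com/kristjanari/Forritun-Python | Skilaverkefni/Skilaverkefni 7/TicTacToe.py | make_vertical
-- ===== SOURCE A (Python) =====
-- def make_vertical(i,a_list):
--     verticalX = []
--     verticalO = []
--     for row in a_list:
--         verticalX.append(row[i])
--         verticalO.append(row[i])
--     for i in range(len(a_list)):
--         if "X" in verticalX:
--             verticalX.remove("X")
--     for i in range(len(a_list)):
--         if "O" in verticalO:
--             verticalO.remove("O")
--     return verticalX,verticalO
-- ===== SOURCE B (Python) =====
-- def make_vertical(i, a_list):
--     col = [row[i] for row in a_list]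
--     return [c for c in col if c != "X"], [c for c in col if c != "O"]
-- ===== Notes on version B (the rewrite author's own statement) =====
-- stated objective: simpler
-- what changed: Builds the column once and produces each result by a single order-preserving filter pass, instead of A's copy-then-n-rounds-of-membership-test-and-remove (each a full scan).
import Mathlib
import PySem

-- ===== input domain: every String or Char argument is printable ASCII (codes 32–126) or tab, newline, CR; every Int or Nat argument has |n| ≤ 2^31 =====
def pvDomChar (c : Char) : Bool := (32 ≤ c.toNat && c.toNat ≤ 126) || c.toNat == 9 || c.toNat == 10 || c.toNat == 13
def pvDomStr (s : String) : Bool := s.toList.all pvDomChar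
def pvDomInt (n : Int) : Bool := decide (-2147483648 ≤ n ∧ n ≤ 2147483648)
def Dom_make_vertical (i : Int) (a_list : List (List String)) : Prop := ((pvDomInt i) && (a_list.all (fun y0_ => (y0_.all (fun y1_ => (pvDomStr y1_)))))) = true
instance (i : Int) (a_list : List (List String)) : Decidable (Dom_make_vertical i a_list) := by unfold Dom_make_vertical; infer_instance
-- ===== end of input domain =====

-- B builds the column once and filters it twice in single passes, replacing A's
-- copy-then-n-rounds-of-membership-test-and-remove; return values proved equal on Pre_.

-- ===== PORT A =====
-- one pass of A's 'if s in l: l.remove(s)' (remove? = first occurrence, exact)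
def mvRemoveStep (s : String) (l : List String) : List String :=
  if s ∈ l then (PySem.List.remove? l s).getD l else l

def make_vertical (i : Int) (a_list : List (List String)) : List String × List String :=
  -- first loop: append row[i] to both lists (pyGetD is exact under Pre_: index in range)
  let pair := a_list.foldl
    (fun (p : List String × List String) row =>
      (p.1 ++ [PySem.List.pyGetD row i ""], p.2 ++ [PySem.List.pyGetD row i ""]))
    ([], [])
  -- 'for i in range(len(a_list)): if "X" in verticalX: verticalX.remove("X")'
  let verticalX := (List.range a_list.length).foldl (fun l _ => mvRemoveStep "X" l) pair.1
  let verticalO := (List.range a_list.length).foldl (fun l _ => mvRemoveStep "O" l) pair.2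
  (verticalX, verticalO)

-- ===== PORT B =====
def make_vertical_alt (i : Int) (a_list : List (List String)) : List String × List String :=
  let col := a_list.map (fun row => PySem.List.pyGetD row i "")
  (col.filter (· ≠ "X"), col.filter (· ≠ "O"))

-- ===== PRECONDITION & SPEC =====
-- Pre_: the column index is valid for every row (otherwise Python A raises IndexError on row[i])
def Pre_make_vertical (i : Int) (a_list : List (List String)) : Prop :=
  ∀ row ∈ a_list, PySem.Raise.InRange row.length i
instance (i : Int) (a_list : List (List String)) : Decidable (Pre_make_vertical i a_list) := by unfold Pre_make_vertical; infer_instance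
def pvWitness_make_vertical : Int × List (List String) := (1, [["X", "O"], ["1", "X"], ["O", "2"]])
def Spec_make_vertical (i : Int) (a_list : List (List String)) (out : List String × List String) : Prop := out = make_vertical_alt i a_list
instance (i : Int) (a_list : List (List String)) (out : List String × List String) : Decidable (Spec_make_vertical i a_list out) := by unfold Spec_make_vertical; infer_instance

-- ===== CLAIM (what is proved, stated in full; the proofs are below) =====
def Claim_equal_make_vertical : Prop := ∀ (i : Int) (a_list : List (List String)), Dom_make_vertical i a_list → Pre_make_vertical i a_list → Spec_make_vertical i a_list (make_vertical i a_list)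

-- ===== LEMMAS AND PROOFS =====

-- A's first loop builds (col, col), the column, in both components
theorem mv_fold_col (i : Int) (a_list : List (List String)) (a b : List String) :
    a_list.foldl
      (fun (p : List String × List String) row =>
        (p.1 ++ [PySem.List.pyGetD row i ""], p.2 ++ [PySem.List.pyGetD row i ""]))
      (a, b)
    = (a ++ a_list.map (fun row => PySem.List.pyGetD row i ""),
       b ++ a_list.map (fun row => PySem.List.pyGetD row i "")) := by
  induction a_list generalizing a b with
  | nil => simp
  | cons r t ih => simp [List.foldl_cons, ih]

theorem mvRemoveStep_eq (s : String) (l : List String) :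
    mvRemoveStep s l = if s ∈ l then l.erase s else l := by
  unfold mvRemoveStep
  split_ifs with h
  · rw [PySem.List.remove?_eq_some_erase l s h]; rfl
  · rfl

theorem filter_erase_of_false (p : String → Bool) (s : String) (hp : p s = false)
    (l : List String) : (l.erase s).filter p = l.filter p := by
  induction l with
  | nil => rfl
  | cons a t ih =>
    by_cases h : a = s
    · subst h; rw [List.erase_cons_head, List.filter_cons, hp]; simp
    · rw [List.erase_cons_tail (by simp [h]), List.filter_cons, List.filter_cons, ih]

-- n rounds of 'if s in l: l.remove(s)' with count s l ≤ n remove every s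
theorem mv_iter_remove (s : String) :
    ∀ (n : Nat) (l : List String), l.count s ≤ n →
      (List.range n).foldl (fun l _ => mvRemoveStep s l) l = l.filter (· ≠ s) := by
  intro n
  induction n with
  | zero =>
    intro l h
    have h0 : s ∉ l := by
      intro hm
      exact absurd (List.count_pos_iff.2 hm) (by omega)
    simp
    exact (List.filter_eq_self.2 (by
      intro a ha; simp; intro he; exact h0 (he ▸ ha))).symm
  | succ n ih =>
    intro l h
    have hstep : (List.range (n + 1)).foldl (fun l _ => mvRemoveStep s l) l
        = (List.range n).foldl (fun l _ => mvRemoveStep s l) (mvRemoveStep s l) := by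
      rw [List.range_succ_eq_map, List.foldl_cons, List.foldl_map]
    rw [hstep, mvRemoveStep_eq]
    split_ifs with hm
    · have hc : (l.erase s).count s ≤ n := by
        have h1 := List.count_erase_self (a := s) (l := l)
        have h2 := List.count_pos_iff.2 hm
        omega
      rw [ih _ hc]
      exact filter_erase_of_false _ s (by simp) l
    · rw [ih _ (by simp [List.count_eq_zero_of_not_mem hm])]

-- ===== VERDICT (by name: the statement is the Claim_ definition above) =====
theorem make_vertical_spec : Claim_equal_make_vertical := by
  intro i a_list _ _
  unfold Spec_make_vertical make_vertical make_vertical_alt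
  rw [mv_fold_col]
  simp only [List.nil_append]
  rw [mv_iter_remove "X" a_list.length (a_list.map (fun row => PySem.List.pyGetD row i ""))
        (le_trans List.count_le_length (by simp)),
      mv_iter_remove "O" a_list.length (a_list.map (fun row => PySem.List.pyGetD row i ""))
        (le_trans List.count_le_length (by simp))]
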